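-- pv_equiv track=rewrite | github.com/neuropoly/mp2rage | naming.py | to_series_name
-- ===== SOURCE A (Python) =====
-- PARAM_BASE_SEP = '_'
--
-- PARAM_SEP = ','
--
-- PARAM_KEY_VAL_SEP = '='
--
-- def set_param_val(
--         param_val,
--         param_key,
--         kv_sep=PARAM_KEY_VAL_SEP,
--         case='lower'):
--     """
--     Extract numerical value from string information.
--     This expects an appropriate string, as retrieved by parse_filename().
--
--     Args:
--         param_val (int|float|None): The value of the parameter.
--         param_key (str): The string containing the label of the parameter.
--         kv_sep (str): String separating key from value in parameters.
--         case ('lower'|'upper'|None): Set the case of the parameter label.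
--
--     Returns:
--         str: The string containing the information.
--
--     .. _refs:
--         get_param_val, to_series_name
--     """
--     if case == 'lower':
--         param_key = param_key.lower()
--     elif case == 'upper':
--         param_key = param_key.upper()
--     if param_val is not None:
--         param_str = kv_sep.join((param_key, str(param_val)))
--     else:
--         param_str = param_key
--     return param_str
--
-- def to_series_name(
--         base,
--         params,
--         p_sep=PARAM_SEP,
--         kv_sep=PARAM_KEY_VAL_SEP,
--         b_sep=PARAM_BASE_SEP,
--         value_case='lower',
--         tag_case='lower'):
--     """
--     Reconstruct series name from specific information.
--
--     Parameters
--     ==========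
--     base : str
--         Base name of the series, i.e. without parsed parameters.
--     params : (string, float or int) dictionary
--         List of parameters in the (label, value) format.
--     p_sep : str (optional)
--         String separating parameters.
--     kv_sep : str (optional)
--         String separating key from value in parameters.
--     b_sep : str (optional)
--         String separating the parameters from the base name.
--     value_case : 'lower', 'upper' or None (optional)
--         TODO
--     tag_case : 'lower', 'upper' or None (optional)
--         TODO
--
--     Returns
--     =======
--     name : str
--         Full name of the image series.
--
--     See Also
--     ========
--     parse_series_name
--
--     """
--     values = []
--     tags = []
--     for key, val in params.items():
--         if val is not None:
--             values.append(set_param_val(val, key, kv_sep, value_case))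
--         else:
--             tags.append(set_param_val(val, key, kv_sep, tag_case))
--     params = p_sep.join(sorted(values) + sorted(tags))
--     name = b_sep.join((base, params))
--     return name
-- ===== SOURCE B (Python) =====
-- PARAM_BASE_SEP = '_'
-- PARAM_SEP = ','
-- PARAM_KEY_VAL_SEP = '='
--
--
-- def to_series_name(
--         base,
--         params,
--         p_sep=PARAM_SEP,
--         kv_sep=PARAM_KEY_VAL_SEP,
--         b_sep=PARAM_BASE_SEP,
--         value_case='lower',
--         tag_case='lower'):
--     # Single pass: keep ONE always-ordered output list; out[:nv] are the value
--     # entries, out[nv:] the tag entries, each segment kept sorted by linear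
--     # insertion as parameters arrive.  No sorted() call, no partition lists.
--     out = []
--     nv = 0
--     for key, val in params.items():
--         if val is not None:
--             k = key.lower() if value_case == 'lower' else \
--                 key.upper() if value_case == 'upper' else key
--             s = k + kv_sep + str(val)
--             i = 0
--             while i < nv and out[i] <= s:
--                 i += 1
--             out.insert(i, s)
--             nv += 1
--         else:
--             s = key.lower() if tag_case == 'lower' else \
--                 key.upper() if tag_case == 'upper' else key
--             i = nv
--             while i < len(out) and out[i] <= s:
--                 i += 1
--             out.insert(i, s)
--     return base + b_sep + p_sep.join(out)
-- ===== Notes on version B (the rewrite author's own statement) =====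
-- stated objective: alternative
-- what changed: B replaces A's collect-partition-then-two-sorted()-calls pipeline by an online insertion sort: one pass over params.items() maintains a single always-ordered output list with a values/tags boundary index, each formatted entry inserted by linear scan into its segment as it arrives; no sorted() call and no intermediate values/tags lists.
import Mathlib
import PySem

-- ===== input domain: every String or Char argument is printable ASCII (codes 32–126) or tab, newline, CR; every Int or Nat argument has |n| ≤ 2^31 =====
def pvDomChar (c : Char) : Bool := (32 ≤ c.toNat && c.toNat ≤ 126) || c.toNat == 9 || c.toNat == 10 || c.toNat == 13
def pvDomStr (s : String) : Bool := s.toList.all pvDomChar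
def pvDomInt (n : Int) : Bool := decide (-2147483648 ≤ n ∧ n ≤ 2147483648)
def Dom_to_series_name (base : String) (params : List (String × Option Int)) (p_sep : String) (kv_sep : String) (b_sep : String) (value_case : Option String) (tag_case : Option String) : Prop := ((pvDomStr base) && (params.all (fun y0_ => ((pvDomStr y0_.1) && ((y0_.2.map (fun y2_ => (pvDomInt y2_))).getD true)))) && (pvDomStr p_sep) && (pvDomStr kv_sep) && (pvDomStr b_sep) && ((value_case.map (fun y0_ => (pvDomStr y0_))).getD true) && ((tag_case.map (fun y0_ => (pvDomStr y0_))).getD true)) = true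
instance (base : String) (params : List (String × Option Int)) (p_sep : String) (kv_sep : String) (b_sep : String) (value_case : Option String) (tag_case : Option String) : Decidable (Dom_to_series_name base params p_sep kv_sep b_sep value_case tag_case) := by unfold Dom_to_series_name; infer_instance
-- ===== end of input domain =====

-- B replaces A's partition-then-two-sorted()-calls by a one-pass online insertion sort into a
-- single always-ordered output list with a values/tags boundary index (return value only).

-- ===== PORT A =====
def set_param_val (param_val : Option Int) (param_key : String) (kv_sep : String) (case : Option String) : String :=
  let param_key :=
    if case = some "lower" then PySem.Str.lower param_key
    else if case = some "upper" then PySem.Str.upper param_key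
    else param_key
  match param_val with
  | some v => PySem.Str.join kv_sep [param_key, PySem.Int.toStr v]
  | none => param_key

def to_series_name (base : String) (params : List (String × Option Int)) (p_sep : String) (kv_sep : String) (b_sep : String) (value_case : Option String) (tag_case : Option String) : String :=
  let vt := params.foldl
    (fun (acc : List String × List String) kv =>
      if kv.2.isSome then (acc.1 ++ [set_param_val kv.2 kv.1 kv_sep value_case], acc.2)
      else (acc.1, acc.2 ++ [set_param_val kv.2 kv.1 kv_sep tag_case]))
    ([], [])
  let ps := PySem.Str.join p_sep
    (PySem.List.sorted vt.1 (fun x => x) ++ PySem.List.sorted vt.2 (fun x => x))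
  PySem.Str.join b_sep [base, ps]

-- ===== PORT B =====
-- the 'while i < stop and out[i] <= s: i += 1' scan of Source B (out[i] is always in range when
-- reached from pv_step, so the getD default never decides the result)
def pv_scan (out : List String) (s : String) (stop : Nat) (i : Nat) : Nat :=
  if h : i < stop ∧ out.getD i "" ≤ s then pv_scan out s stop (i + 1) else i
termination_by stop - i
decreasing_by have := h.1; omega

-- the body of Source B's single loop; st.1 = the ordered list 'out', st.2 = the boundary 'nv'
def pv_step (kv_sep : String) (value_case tag_case : Option String)
    (st : List String × Nat) (kv : String × Option Int) : List String × Nat :=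
  match kv.2 with
  | some v =>
    let k := if value_case = some "lower" then PySem.Str.lower kv.1
             else if value_case = some "upper" then PySem.Str.upper kv.1
             else kv.1
    let s := k ++ kv_sep ++ PySem.Int.toStr v
    (st.1.insertIdx (pv_scan st.1 s st.2 0) s, st.2 + 1)
  | none =>
    let s := if tag_case = some "lower" then PySem.Str.lower kv.1
             else if tag_case = some "upper" then PySem.Str.upper kv.1
             else kv.1
    (st.1.insertIdx (pv_scan st.1 s st.1.length st.2) s, st.2)

def to_series_name_alt (base : String) (params : List (String × Option Int)) (p_sep : String) (kv_sep : String) (b_sep : String) (value_case : Option String) (tag_case : Option String) : String :=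
  let st := params.foldl (pv_step kv_sep value_case tag_case) ([], 0)
  base ++ b_sep ++ PySem.Str.join p_sep st.1

-- ===== PRECONDITION & SPEC =====
def Spec_to_series_name (base : String) (params : List (String × Option Int)) (p_sep : String) (kv_sep : String) (b_sep : String) (value_case : Option String) (tag_case : Option String) (out : String) : Prop := out = to_series_name_alt base params p_sep kv_sep b_sep value_case tag_case
instance (base : String) (params : List (String × Option Int)) (p_sep : String) (kv_sep : String) (b_sep : String) (value_case : Option String) (tag_case : Option String) (out : String) : Decidable (Spec_to_series_name base params p_sep kv_sep b_sep value_case tag_case out) := by unfold Spec_to_series_name; infer_instance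

-- ===== CLAIM (what is proved, stated in full; the proofs are below) =====
def Claim_equal_to_series_name : Prop := ∀ (base : String) (params : List (String × Option Int)) (p_sep : String) (kv_sep : String) (b_sep : String) (value_case : Option String) (tag_case : Option String), Dom_to_series_name base params p_sep kv_sep b_sep value_case tag_case → Spec_to_series_name base params p_sep kv_sep b_sep value_case tag_case (to_series_name base params p_sep kv_sep b_sep value_case tag_case)

-- ===== LEMMAS AND PROOFS =====

-- sep.join of a pair is concatenation
theorem join_pair (sep a b : String) : PySem.Str.join sep [a, b] = a ++ sep ++ b := by
  have h : (PySem.Str.join sep [a, b]).toList = (a ++ sep ++ b).toList := by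
    rw [PySem.Str.toList_join]
    simp [PySem.Chars.join_cons_cons, PySem.Chars.join_singleton]
  exact String.toList_injective h

-- A's loop: the two accumulators are the two filtered map passes
theorem foldl_split (params : List (String × Option Int)) (kv_sep : String)
    (value_case tag_case : Option String) :
    params.foldl
      (fun (acc : List String × List String) kv =>
        if kv.2.isSome then (acc.1 ++ [set_param_val kv.2 kv.1 kv_sep value_case], acc.2)
        else (acc.1, acc.2 ++ [set_param_val kv.2 kv.1 kv_sep tag_case]))
      ([], [])
    = ((params.filter (fun kv => kv.2.isSome)).map
         (fun kv => set_param_val kv.2 kv.1 kv_sep value_case),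
       (params.filter (fun kv => !kv.2.isSome)).map
         (fun kv => set_param_val kv.2 kv.1 kv_sep tag_case)) := by
  suffices h : ∀ (l : List (String × Option Int)) (acc : List String × List String),
      l.foldl
        (fun (acc : List String × List String) kv =>
          if kv.2.isSome then (acc.1 ++ [set_param_val kv.2 kv.1 kv_sep value_case], acc.2)
          else (acc.1, acc.2 ++ [set_param_val kv.2 kv.1 kv_sep tag_case]))
        acc
      = (acc.1 ++ (l.filter (fun kv => kv.2.isSome)).map
           (fun kv => set_param_val kv.2 kv.1 kv_sep value_case),
         acc.2 ++ (l.filter (fun kv => !kv.2.isSome)).map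
           (fun kv => set_param_val kv.2 kv.1 kv_sep tag_case)) by
    simpa using h params ([], [])
  intro l
  induction l with
  | nil => intro acc; simp
  | cons kv t ih =>
    intro acc
    cases hv : kv.2 <;> simp [List.foldl_cons, hv, ih]

-- the scan stops right after the ≤-prefix of the middle segment
theorem scan_eq (s : String) : ∀ (V pre T : List String),
    pv_scan (pre ++ V ++ T) s (pre.length + V.length) pre.length
    = pre.length + (V.takeWhile (fun y => y ≤ s)).length := by
  intro V
  induction V with
  | nil => intro pre T; rw [pv_scan]; simp
  | cons y ys ih =>
    intro pre T
    rw [pv_scan]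
    have hget : (pre ++ (y :: ys) ++ T).getD pre.length "" = y := by
      simp [List.getD]
    by_cases hy : y ≤ s
    · rw [dif_pos ⟨by simp, by rw [hget]; exact hy⟩]
      have h' := ih (pre ++ [y]) T
      rw [show pre ++ [y] ++ ys ++ T = pre ++ (y :: ys) ++ T by simp] at h'
      simp only [List.length_append, List.length_cons, List.length_nil] at h' ⊢
      rw [show pre.length + (ys.length + 1) = pre.length + 1 + ys.length by omega,
          show pre.length + 1 = pre.length + 1 by rfl]
      rw [h', List.takeWhile_cons_of_pos (by simpa using hy)]
      simp only [List.length_cons]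
      omega
    · rw [dif_neg (by rw [hget]; tauto)]
      rw [List.takeWhile_cons_of_neg (by simpa using hy)]
      simp

-- inserting at an offset inside the right segment
theorem insertIdx_offset (x : String) (n : Nat) : ∀ (V T : List String),
    (V ++ T).insertIdx (V.length + n) x = V ++ T.insertIdx n x := by
  intro V
  induction V with
  | nil => intro T; simp
  | cons y ys ih =>
    intro T
    simp only [List.cons_append, List.length_cons]
    rw [show ys.length + 1 + n = (ys.length + n) + 1 by omega, List.insertIdx_succ_cons, ih]

-- inserting at the end of the ≤-prefix of the left segment
theorem insertIdx_takeWhile (p : String → Bool) (x : String) : ∀ (V T : List String),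
    (V ++ T).insertIdx ((V.takeWhile p).length) x
    = (V.takeWhile p ++ x :: V.dropWhile p) ++ T := by
  intro V
  induction V with
  | nil => intro T; simp
  | cons y ys ih =>
    intro T
    by_cases hp : p y
    · rw [List.takeWhile_cons_of_pos hp, List.dropWhile_cons_of_pos hp]
      simp only [List.length_cons, List.cons_append, List.insertIdx_succ_cons]
      rw [ih]
    · rw [List.takeWhile_cons_of_neg (by simpa using hp),
          List.dropWhile_cons_of_neg (by simpa using hp)]
      simp

-- PySem's stable insertion step is exactly 'insert after everything ≤ x'
theorem insertBy_eq_takeWhile (x : String) : ∀ (V : List String),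
    PySem.List.insertBy (fun a b => decide (a < b)) x V
    = V.takeWhile (fun y => y ≤ x) ++ x :: V.dropWhile (fun y => y ≤ x) := by
  intro V
  induction V with
  | nil => rfl
  | cons y ys ih =>
    rw [PySem.List.insertBy]
    by_cases hyx : y ≤ x
    · have ht : List.takeWhile (fun y => decide (y ≤ x)) (y :: ys)
          = y :: List.takeWhile (fun y => decide (y ≤ x)) ys :=
        List.takeWhile_cons_of_pos (by simpa using hyx)
      have hd : List.dropWhile (fun y => decide (y ≤ x)) (y :: ys)
          = List.dropWhile (fun y => decide (y ≤ x)) ys :=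
        List.dropWhile_cons_of_pos (by simpa using hyx)
      rw [if_neg (by simpa using not_lt.mpr hyx), ht, hd, ih]
      rfl
    · have ht : List.takeWhile (fun y => decide (y ≤ x)) (y :: ys) = [] :=
        List.takeWhile_cons_of_neg (by simpa using hyx)
      have hd : List.dropWhile (fun y => decide (y ≤ x)) (y :: ys) = y :: ys :=
        List.dropWhile_cons_of_neg (by simpa using hyx)
      rw [if_pos (by simpa using not_le.mp hyx), ht, hd]
      rfl

-- sorted of a snoc = insertBy into sorted
theorem sorted_snoc (vs : List String) (x : String) :
    PySem.List.sorted (vs ++ [x]) (fun y => y)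
    = PySem.List.insertBy (fun a b => decide (a < b)) x
        (PySem.List.sorted vs (fun y => y)) := by
  rw [PySem.List.sorted_eq_foldl_insertBy, PySem.List.sorted_eq_foldl_insertBy,
      List.foldl_append]
  rfl

-- the loop invariant of B's single pass: out = sorted(values so far) ++ sorted(tags so far),
-- nv = number of values so far
theorem alt_fold_inv (kv_sep : String) (value_case tag_case : Option String) :
    ∀ (ps : List (String × Option Int)) (vs ts : List String),
    ps.foldl (pv_step kv_sep value_case tag_case)
      (PySem.List.sorted vs (fun y => y) ++ PySem.List.sorted ts (fun y => y), vs.length)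
    = (PySem.List.sorted
         (vs ++ (ps.filter (fun kv => kv.2.isSome)).map
            (fun kv => set_param_val kv.2 kv.1 kv_sep value_case)) (fun y => y)
       ++ PySem.List.sorted
         (ts ++ (ps.filter (fun kv => !kv.2.isSome)).map
            (fun kv => set_param_val kv.2 kv.1 kv_sep tag_case)) (fun y => y),
       vs.length
       + ((ps.filter (fun kv => kv.2.isSome)).map
            (fun kv => set_param_val kv.2 kv.1 kv_sep value_case)).length) := by
  intro ps
  induction ps with
  | nil => intro vs ts; simp
  | cons kv rest ih =>
    intro vs ts
    rw [List.foldl_cons]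
    have hlenV : (PySem.List.sorted vs (fun y : String => y)).length = vs.length :=
      PySem.List.length_sorted vs _ false
    cases hv : kv.2 with
    | some v =>
      have hsv : set_param_val kv.2 kv.1 kv_sep value_case
          = (if value_case = some "lower" then PySem.Str.lower kv.1
             else if value_case = some "upper" then PySem.Str.upper kv.1
             else kv.1) ++ kv_sep ++ PySem.Int.toStr v := by
        rw [hv]; simp only [set_param_val]; rw [join_pair]
      have hstep : pv_step kv_sep value_case tag_case
          (PySem.List.sorted vs (fun y => y) ++ PySem.List.sorted ts (fun y => y), vs.length) kv
          = (PySem.List.sorted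
               (vs ++ [(if value_case = some "lower" then PySem.Str.lower kv.1
                        else if value_case = some "upper" then PySem.Str.upper kv.1
                        else kv.1) ++ kv_sep ++ PySem.Int.toStr v]) (fun y => y)
             ++ PySem.List.sorted ts (fun y => y), vs.length + 1) := by
        simp only [pv_step, hv]
        have hscan : pv_scan
            (PySem.List.sorted vs (fun y => y) ++ PySem.List.sorted ts (fun y => y))
            ((if value_case = some "lower" then PySem.Str.lower kv.1
              else if value_case = some "upper" then PySem.Str.upper kv.1
              else kv.1) ++ kv_sep ++ PySem.Int.toStr v) vs.length 0
            = ((PySem.List.sorted vs (fun y => y)).takeWhile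
                (fun y => y ≤ (if value_case = some "lower" then PySem.Str.lower kv.1
                               else if value_case = some "upper" then PySem.Str.upper kv.1
                               else kv.1) ++ kv_sep ++ PySem.Int.toStr v)).length := by
          have h := scan_eq ((if value_case = some "lower" then PySem.Str.lower kv.1
                              else if value_case = some "upper" then PySem.Str.upper kv.1
                              else kv.1) ++ kv_sep ++ PySem.Int.toStr v)
            (PySem.List.sorted vs (fun y => y)) [] (PySem.List.sorted ts (fun y => y))
          simpa [hlenV] using h
        rw [hscan, insertIdx_takeWhile, ← insertBy_eq_takeWhile, ← sorted_snoc]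
      rw [hstep]
      have := ih (vs ++ [(if value_case = some "lower" then PySem.Str.lower kv.1
                          else if value_case = some "upper" then PySem.Str.upper kv.1
                          else kv.1) ++ kv_sep ++ PySem.Int.toStr v]) ts
      rw [show vs.length + 1
            = (vs ++ [(if value_case = some "lower" then PySem.Str.lower kv.1
                       else if value_case = some "upper" then PySem.Str.upper kv.1
                       else kv.1) ++ kv_sep ++ PySem.Int.toStr v]).length by simp, this]
      have hfv : List.filter (fun kv => kv.2.isSome) (kv :: rest)
          = kv :: List.filter (fun kv => kv.2.isSome) rest := by
        simp [hv]
      have hft : List.filter (fun kv => !kv.2.isSome) (kv :: rest)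
          = List.filter (fun kv => !kv.2.isSome) rest := by
        simp [hv]
      rw [hfv, hft, List.map_cons, hsv]
      simp only [Prod.mk.injEq, List.append_assoc, List.singleton_append,
        List.length_append, List.length_cons, List.length_nil]
      refine ⟨?_, ?_⟩ <;> first | trivial | omega
    | none =>
      have hsv : set_param_val kv.2 kv.1 kv_sep tag_case
          = (if tag_case = some "lower" then PySem.Str.lower kv.1
             else if tag_case = some "upper" then PySem.Str.upper kv.1
             else kv.1) := by
        rw [hv]; simp only [set_param_val]
      have hstep : pv_step kv_sep value_case tag_case
          (PySem.List.sorted vs (fun y => y) ++ PySem.List.sorted ts (fun y => y), vs.length) kv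
          = (PySem.List.sorted vs (fun y => y)
             ++ PySem.List.sorted
                  (ts ++ [if tag_case = some "lower" then PySem.Str.lower kv.1
                          else if tag_case = some "upper" then PySem.Str.upper kv.1
                          else kv.1]) (fun y => y), vs.length) := by
        simp only [pv_step, hv]
        have h := scan_eq (if tag_case = some "lower" then PySem.Str.lower kv.1
                           else if tag_case = some "upper" then PySem.Str.upper kv.1
                           else kv.1)
          (PySem.List.sorted ts (fun y => y)) (PySem.List.sorted vs (fun y => y)) []
        rw [List.append_nil] at h
        have hscan : pv_scan
            (PySem.List.sorted vs (fun y => y) ++ PySem.List.sorted ts (fun y => y))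
            (if tag_case = some "lower" then PySem.Str.lower kv.1
             else if tag_case = some "upper" then PySem.Str.upper kv.1
             else kv.1)
            (PySem.List.sorted vs (fun y => y) ++ PySem.List.sorted ts (fun y => y)).length
            vs.length
            = (PySem.List.sorted vs (fun y => y)).length
              + ((PySem.List.sorted ts (fun y => y)).takeWhile
                  (fun y => y ≤ if tag_case = some "lower" then PySem.Str.lower kv.1
                                else if tag_case = some "upper" then PySem.Str.upper kv.1
                                else kv.1)).length := by
          rw [List.length_append, ← hlenV]
          exact h
        rw [hscan, insertIdx_offset]
        have h2 := insertIdx_takeWhile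
          (fun y => decide (y ≤ if tag_case = some "lower" then PySem.Str.lower kv.1
                                else if tag_case = some "upper" then PySem.Str.upper kv.1
                                else kv.1))
          (if tag_case = some "lower" then PySem.Str.lower kv.1
           else if tag_case = some "upper" then PySem.Str.upper kv.1
           else kv.1)
          (PySem.List.sorted ts (fun y => y)) []
        rw [List.append_nil, List.append_nil] at h2
        rw [h2, ← insertBy_eq_takeWhile, ← sorted_snoc]
      rw [hstep, ih vs (ts ++ [if tag_case = some "lower" then PySem.Str.lower kv.1
                               else if tag_case = some "upper" then PySem.Str.upper kv.1
                               else kv.1])]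
      have hfv : List.filter (fun kv => kv.2.isSome) (kv :: rest)
          = List.filter (fun kv => kv.2.isSome) rest := by
        simp [hv]
      have hft : List.filter (fun kv => !kv.2.isSome) (kv :: rest)
          = kv :: List.filter (fun kv => !kv.2.isSome) rest := by
        simp [hv]
      rw [hfv, hft, List.map_cons, hsv]
      simp only [List.append_assoc, List.singleton_append]

-- ===== VERDICT (by name: the statement is the Claim_ definition above) =====
theorem to_series_name_spec : Claim_equal_to_series_name := by
  intro base params p_sep kv_sep b_sep value_case tag_case _
  show to_series_name base params p_sep kv_sep b_sep value_case tag_case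
      = to_series_name_alt base params p_sep kv_sep b_sep value_case tag_case
  unfold to_series_name to_series_name_alt
  simp only [foldl_split]
  have h := alt_fold_inv kv_sep value_case tag_case params [] []
  have hnil : PySem.List.sorted ([] : List String) (fun y : String => y) = [] := rfl
  simp only [hnil, List.nil_append, List.length_nil, Nat.zero_add] at h
  rw [h]
  rw [join_pair]
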